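-- pv_equiv track=rewrite | github.com/USFDataVisualization/TopoLines | topolines/topolines.py | filter_cps_threshold
-- ===== SOURCE A (Python) =====
-- from operator import itemgetter
--
-- def filter_cps_threshold(data, pairs, threshold):
--     indices = {0, len(data) - 1}
--
--     for p in filter(lambda pair: pair['persistence'] >= threshold, pairs):
--         if 0 <= p['c0'] <= len(data): indices.add(p['c0'])
--         if 0 <= p['c1'] <= len(data): indices.add(p['c1'])
--
--     new_cps = list(map(lambda x: [x, data[x]], indices))
--     new_cps.sort(key=itemgetter(0))
--     return new_cps
-- ===== SOURCE B (Python) =====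
-- def filter_cps_threshold(data, pairs, threshold):
--     n = len(data)
--     kept = [p for p in pairs if p['persistence'] >= threshold]
--     return [[x, v] for x, v in enumerate(data)
--             if x == 0 or x == n - 1
--             or any(p['c0'] == x or p['c1'] == x for p in kept)]
-- ===== Notes on version B (the rewrite author's own statement) =====
-- stated objective: alternative
-- what changed: B is position-major instead of pair-major: it filters the threshold-passing pairs once, then walks the data positions in order and keeps a position iff it is an endpoint or some kept pair names it, so no index set is built and no sort is performed; the order is ascending by construction.
-- outside the precondition, e.g. on filter_cps_threshold([], [], 0): A raises IndexError, B returns []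
import Mathlib
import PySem

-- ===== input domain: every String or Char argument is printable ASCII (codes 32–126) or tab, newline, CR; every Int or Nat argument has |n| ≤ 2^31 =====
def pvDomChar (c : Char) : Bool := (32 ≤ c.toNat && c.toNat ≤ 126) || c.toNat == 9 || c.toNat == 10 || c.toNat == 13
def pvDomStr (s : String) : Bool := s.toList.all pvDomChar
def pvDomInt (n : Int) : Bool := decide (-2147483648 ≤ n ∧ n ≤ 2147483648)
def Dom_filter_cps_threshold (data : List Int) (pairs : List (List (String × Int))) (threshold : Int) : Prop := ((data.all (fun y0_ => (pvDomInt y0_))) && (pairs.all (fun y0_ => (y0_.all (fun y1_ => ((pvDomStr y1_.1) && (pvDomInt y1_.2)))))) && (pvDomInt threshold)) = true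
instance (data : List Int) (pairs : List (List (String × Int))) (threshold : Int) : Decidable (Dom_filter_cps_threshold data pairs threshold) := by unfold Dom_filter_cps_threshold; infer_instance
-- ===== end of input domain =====

-- B is position-major: it filters the passing pairs once, then walks the positions in order keeping those named; no set, no sort. Equivalence is about return values (neither mutates its arguments).

-- p[k] as first-match association-list lookup (total stand-in; Pre_ requires the key to be present wherever Python evaluates p[k])
def pvGet (p : List (String × Int)) (k : String) : Int :=
  ((p.find? (fun kv => kv.1 == k)).map Prod.snd).getD 0

-- ===== PORT A =====
-- 'if 0 <= c <= len(data): indices.add(c)'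
def pvAddIf (n : Int) (s : PySem.Set Int) (c : Int) : PySem.Set Int :=
  if 0 ≤ c ∧ c ≤ n then PySem.Set.add s c else s

-- loop body of A's 'for p in filter(...)'
def pvStepA (n threshold : Int) (s : PySem.Set Int) (p : List (String × Int)) : PySem.Set Int :=
  if pvGet p "persistence" ≥ threshold then
    pvAddIf n (pvAddIf n s (pvGet p "c0")) (pvGet p "c1")
  else s

def filter_cps_threshold (data : List Int) (pairs : List (List (String × Int))) (threshold : Int) : List (List Int) :=
  let indices : PySem.Set Int := PySem.Set.ofList [0, (data.length : Int) - 1]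
  let indices := pairs.foldl (pvStepA (data.length : Int) threshold) indices
  let new_cps := indices.map (fun x => [x, PySem.List.pyGetD data x 0])
  PySem.List.sorted new_cps (fun l => l.headD 0) false

-- ===== PORT B =====
-- 'x == 0 or x == n - 1 or any(p['c0'] == x or p['c1'] == x for p in kept)'
def pvCond (n : Int) (kept : List (List (String × Int))) (x : Int) : Bool :=
  x == 0 || x == n - 1 || kept.any (fun p => pvGet p "c0" == x || pvGet p "c1" == x)

def filter_cps_threshold_alt (data : List Int) (pairs : List (List (String × Int))) (threshold : Int) : List (List Int) :=
  let n : Int := data.length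
  let kept := pairs.filter (fun p => decide (pvGet p "persistence" ≥ threshold))
  (PySem.List.enumerate data).filterMap
    (fun xv => if pvCond n kept xv.1 then some [xv.1, xv.2] else none)

-- ===== PRECONDITION & SPEC =====
-- Pre_ excludes exactly the inputs where Python A raises: empty data (IndexError), a pair missing a key
-- Python looks up (KeyError), or a threshold-passing pair whose c0/c1 equals len(data) (IndexError on data[len(data)]).
def Pre_filter_cps_threshold (data : List Int) (pairs : List (List (String × Int))) (threshold : Int) : Prop :=
  data ≠ [] ∧ ∀ p ∈ pairs,
    (p.find? (fun kv => kv.1 == "persistence")).isSome ∧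
    (pvGet p "persistence" ≥ threshold →
      (p.find? (fun kv => kv.1 == "c0")).isSome ∧ (p.find? (fun kv => kv.1 == "c1")).isSome ∧
      pvGet p "c0" ≠ (data.length : Int) ∧ pvGet p "c1" ≠ (data.length : Int))
instance (data : List Int) (pairs : List (List (String × Int))) (threshold : Int) : Decidable (Pre_filter_cps_threshold data pairs threshold) := by unfold Pre_filter_cps_threshold; infer_instance

def pvWitness_filter_cps_threshold : List Int × (List (List (String × Int))) × Int :=
  ([1, 2], [[("persistence", 5), ("c0", 1), ("c1", 0)]], 0)

def Spec_filter_cps_threshold (data : List Int) (pairs : List (List (String × Int))) (threshold : Int) (out : List (List Int)) : Prop := out = filter_cps_threshold_alt data pairs threshold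
instance (data : List Int) (pairs : List (List (String × Int))) (threshold : Int) (out : List (List Int)) : Decidable (Spec_filter_cps_threshold data pairs threshold out) := by unfold Spec_filter_cps_threshold; infer_instance

-- ===== CLAIM (what is proved, stated in full; the proofs are below) =====
def Claim_equal_filter_cps_threshold : Prop := ∀ (data : List Int) (pairs : List (List (String × Int))) (threshold : Int), Dom_filter_cps_threshold data pairs threshold → Pre_filter_cps_threshold data pairs threshold → Spec_filter_cps_threshold data pairs threshold (filter_cps_threshold data pairs threshold)

-- ===== LEMMAS AND PROOFS =====

-- membership characterisation of A's index-collecting fold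
lemma pv_mem_addIf (n : Int) (s : PySem.Set Int) (c x : Int) :
    x ∈ pvAddIf n s c ↔ x ∈ s ∨ (c = x ∧ 0 ≤ c ∧ c ≤ n) := by
  unfold pvAddIf
  by_cases h : 0 ≤ c ∧ c ≤ n
  · rw [if_pos h, PySem.Set.mem_add]
    constructor
    · rintro (hx | rfl)
      · exact Or.inl hx
      · exact Or.inr ⟨rfl, h⟩
    · rintro (hx | ⟨rfl, _⟩)
      · exact Or.inl hx
      · exact Or.inr rfl
  · rw [if_neg h]
    constructor
    · exact Or.inl
    · rintro (hx | ⟨rfl, hb⟩)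
      · exact hx
      · exact absurd hb h

lemma pv_mem_stepA (n threshold : Int) (s : PySem.Set Int) (p : List (String × Int)) (x : Int) :
    x ∈ pvStepA n threshold s p ↔ x ∈ s ∨
      (pvGet p "persistence" ≥ threshold ∧
        ((pvGet p "c0" = x ∧ 0 ≤ x ∧ x ≤ n) ∨ (pvGet p "c1" = x ∧ 0 ≤ x ∧ x ≤ n))) := by
  unfold pvStepA
  by_cases hp : pvGet p "persistence" ≥ threshold
  · rw [if_pos hp, pv_mem_addIf, pv_mem_addIf]
    constructor
    · rintro ((hx | ⟨rfl, hb⟩) | ⟨rfl, hb⟩)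
      · exact Or.inl hx
      · exact Or.inr ⟨hp, Or.inl ⟨rfl, hb⟩⟩
      · exact Or.inr ⟨hp, Or.inr ⟨rfl, hb⟩⟩
    · rintro (hx | ⟨_, (⟨rfl, hb⟩ | ⟨rfl, hb⟩)⟩)
      · exact Or.inl (Or.inl hx)
      · exact Or.inl (Or.inr ⟨rfl, hb⟩)
      · exact Or.inr ⟨rfl, hb⟩
  · rw [if_neg hp]
    constructor
    · exact Or.inl
    · rintro (hx | ⟨hpass, _⟩)
      · exact hx
      · exact absurd hpass hp

lemma pv_mem_foldA (n threshold : Int) (pairs : List (List (String × Int)))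
    (s : PySem.Set Int) (x : Int) :
    x ∈ pairs.foldl (pvStepA n threshold) s ↔ x ∈ s ∨
      ∃ p ∈ pairs, pvGet p "persistence" ≥ threshold ∧
        ((pvGet p "c0" = x ∧ 0 ≤ x ∧ x ≤ n) ∨ (pvGet p "c1" = x ∧ 0 ≤ x ∧ x ≤ n)) := by
  induction pairs generalizing s with
  | nil => simp
  | cons p rest ih =>
    simp only [List.foldl_cons, ih, pv_mem_stepA, List.mem_cons]
    constructor
    · rintro ((hx | hq) | ⟨q, hq, hrest⟩)
      · exact Or.inl hx
      · exact Or.inr ⟨p, Or.inl rfl, hq⟩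
      · exact Or.inr ⟨q, Or.inr hq, hrest⟩
    · rintro (hx | ⟨q, (rfl | hq), hrest⟩)
      · exact Or.inl (Or.inl hx)
      · exact Or.inl (Or.inr hrest)
      · exact Or.inr ⟨q, hq, hrest⟩

lemma pv_nodup_foldA (n threshold : Int) (pairs : List (List (String × Int)))
    (s : PySem.Set Int) (h : s.Nodup) :
    (pairs.foldl (pvStepA n threshold) s).Nodup := by
  induction pairs generalizing s with
  | nil => exact h
  | cons p rest ih =>
    apply ih
    unfold pvStepA pvAddIf
    split_ifs <;> first
      | exact PySem.Set.nodup_add _ _ (PySem.Set.nodup_add _ _ h)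
      | exact PySem.Set.nodup_add _ _ h
      | exact h

-- for a position 0 ≤ k < n, membership in A's final set ↔ B's keep-condition
lemma pv_cond_iff_mem (data : List Int) (pairs : List (List (String × Int))) (threshold : Int)
    (x : Int) (hx0 : 0 ≤ x) (hxn : x < (data.length : Int)) :
    (pvCond (data.length : Int)
        (pairs.filter (fun p => decide (pvGet p "persistence" ≥ threshold))) x = true) ↔
      x ∈ pairs.foldl (pvStepA (data.length : Int) threshold)
            (PySem.Set.ofList [0, (data.length : Int) - 1]) := by
  rw [pv_mem_foldA]
  have hinit : (x ∈ PySem.Set.ofList [0, (data.length : Int) - 1]) ↔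
      (x = 0 ∨ x = (data.length : Int) - 1) := by
    rw [PySem.Set.mem_ofList]; simp
  unfold pvCond
  simp only [Bool.or_eq_true, beq_iff_eq, List.any_eq_true, List.mem_filter,
    decide_eq_true_eq, hinit]
  constructor
  · rintro ((rfl | rfl) | ⟨p, ⟨hp, hpass⟩, (hc | hc)⟩)
    · exact Or.inl (Or.inl rfl)
    · exact Or.inl (Or.inr rfl)
    · exact Or.inr ⟨p, hp, hpass, Or.inl ⟨hc, hx0, le_of_lt hxn⟩⟩
    · exact Or.inr ⟨p, hp, hpass, Or.inr ⟨hc, hx0, le_of_lt hxn⟩⟩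
  · rintro ((rfl | rfl) | ⟨p, hp, hpass, (⟨hc, _⟩ | ⟨hc, _⟩)⟩)
    · exact Or.inl (Or.inl rfl)
    · exact Or.inl (Or.inr rfl)
    · exact Or.inr ⟨p, ⟨hp, hpass⟩, Or.inl hc⟩
    · exact Or.inr ⟨p, ⟨hp, hpass⟩, Or.inr hc⟩

-- all members of A's final set lie in [0, n) under Pre_
lemma pv_bounds (data : List Int) (pairs : List (List (String × Int))) (threshold : Int)
    (hne : data ≠ [])
    (hall : ∀ p ∈ pairs, pvGet p "persistence" ≥ threshold →
      pvGet p "c0" ≠ (data.length : Int) ∧ pvGet p "c1" ≠ (data.length : Int)) :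
    ∀ x ∈ pairs.foldl (pvStepA (data.length : Int) threshold)
        (PySem.Set.ofList [0, (data.length : Int) - 1]),
      0 ≤ x ∧ x < (data.length : Int) := by
  intro x hx
  have hn : 1 ≤ data.length := List.length_pos_of_ne_nil hne
  rw [pv_mem_foldA] at hx
  rcases hx with hx | ⟨p, hp, hpass, (⟨rfl, hb⟩ | ⟨rfl, hb⟩)⟩
  · rw [PySem.Set.mem_ofList] at hx
    simp only [List.mem_cons, List.not_mem_nil, or_false] at hx
    rcases hx with rfl | rfl <;> omega
  · have := (hall p hp hpass).1; omega
  · have := (hall p hp hpass).2; omega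

-- the sorted map of the set equals B's in-order filtered scan
lemma pvOut_eq (data : List Int) (S : List Int) (cond : Int → Bool)
    (hnd : S.Nodup) (hbd : ∀ x ∈ S, 0 ≤ x ∧ x < (data.length : Int))
    (hiff : ∀ x : Int, 0 ≤ x → x < (data.length : Int) → (cond x = true ↔ x ∈ S)) :
    PySem.List.sorted (S.map (fun x => [x, PySem.List.pyGetD data x 0])) (fun l => l.headD 0) false
      = (PySem.List.enumerate data).filterMap
          (fun xv => if cond xv.1 then some [xv.1, xv.2] else none) := by
  set f : Int → List Int := fun x => [x, PySem.List.pyGetD data x 0] with hf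
  set B := (PySem.List.enumerate data).filterMap (fun xv => if cond xv.1 then some [xv.1, xv.2] else none) with hB
  have hBpair : B.Pairwise (fun a b => a.headD 0 < b.headD 0) := by
    rw [hB, List.pairwise_filterMap]
    apply (PySem.List.pairwise_lt_enumerate data 0).imp
    intro a b hab x hx y hy
    by_cases ha : cond a.1 = true
    · rw [if_pos ha, Option.some.injEq] at hx
      by_cases hbb : cond b.1 = true
      · rw [if_pos hbb, Option.some.injEq] at hy
        subst hx; subst hy
        simpa using hab
      · rw [if_neg hbb] at hy; cases hy
    · rw [if_neg ha] at hx; cases hx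
  have hBmem : ∀ y, y ∈ B ↔ y ∈ S.map f := by
    intro y
    rw [hB, List.mem_filterMap, List.mem_map]
    constructor
    · rintro ⟨xv, hxv, hxe⟩
      rw [PySem.List.mem_enumerate_iff] at hxv
      obtain ⟨k, hk, rfl⟩ := hxv
      simp only [zero_add] at hxe
      by_cases hc : cond (k : Int) = true
      · rw [if_pos hc, Option.some.injEq] at hxe
        have hks : (k : Int) ∈ S := (hiff (k : Int) (by omega) (by omega)).1 hc
        refine ⟨(k : Int), hks, ?_⟩
        rw [hf, ← hxe]
        simp [PySem.List.pyGetD_natCast, List.getD_eq_getElem?_getD, List.getElem?_eq_getElem hk]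
      · rw [if_neg hc] at hxe; cases hxe
    · rintro ⟨x, hx, rfl⟩
      obtain ⟨hx0, hxn⟩ := hbd x hx
      have hk : x.toNat < data.length := by omega
      have hxc : ((x.toNat : Int)) = x := Int.toNat_of_nonneg hx0
      have hc : cond ((x.toNat : Int)) = true := by
        rw [hxc]; exact (hiff x hx0 hxn).2 hx
      refine ⟨((0 : Int) + x.toNat, data[x.toNat]), ?_, ?_⟩
      · rw [PySem.List.mem_enumerate_iff]
        exact ⟨x.toNat, hk, rfl⟩
      · have hcx : cond x = true := hxc ▸ hc
        simp only [zero_add, hxc, hf, hcx, if_true, Option.some.injEq]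
        rw [PySem.List.pyGetD_eq_getElem data 0 hx0 hxn]
  have hBnd : B.Nodup := hBpair.imp (fun {a b} hab => fun he => absurd (he ▸ hab) (lt_irrefl _))
  have hfinj : Function.Injective f := by
    intro a b hab
    have h2 := congrArg (fun l => l.headD 0) hab
    simpa using h2
  have hSnd : (S.map f).Nodup := hnd.map hfinj
  have hperm : B.Perm (S.map f) := (List.perm_ext_iff_of_nodup hBnd hSnd).2 hBmem
  exact (PySem.List.sorted_eq_of_perm_of_pairwise_lt _ _ _ hperm hBpair)

-- ===== VERDICT (by name: the statement is the Claim_ definition above) =====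
theorem filter_cps_threshold_spec : Claim_equal_filter_cps_threshold := by
  intro data pairs threshold _ hpre
  obtain ⟨hne, hall⟩ := hpre
  show filter_cps_threshold data pairs threshold = filter_cps_threshold_alt data pairs threshold
  unfold filter_cps_threshold filter_cps_threshold_alt
  apply pvOut_eq
  · exact pv_nodup_foldA _ _ _ _ (PySem.Set.nodup_ofList _)
  · exact pv_bounds data pairs threshold hne
      (fun p hp hpass => ⟨((hall p hp).2 hpass).2.2.1, ((hall p hp).2 hpass).2.2.2⟩)
  · intro x hx0 hxn
    exact pv_cond_iff_mem data pairs threshold x hx0 hxn
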